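-- pv_equiv track=rewrite | github.com/jossyfresh/CP | D_GCD_sequence.py | check
-- ===== SOURCE A (Python) =====
-- import sys,math,os
--
-- def check(arr):
--     l = 0
--     m = 1
--     r = 2
--     while r < len(arr):
--         x = math.gcd(arr[l],arr[m])
--         y = math.gcd(arr[m],arr[r])
--         if x > y:
--             return False
--         l += 1
--         m += 1
--         r += 1
--     return True
-- ===== SOURCE B (Python) =====
-- import math
--
--
-- def check(arr):
--     # Build the list of adjacent gcds (each gcd computed once), then test
--     # monotonicity by comparing the list with its sorted copy: the adjacent
--     # gcds are non-decreasing exactly when sorting leaves the list unchanged.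
--     g = list(map(math.gcd, arr, arr[1:]))
--     return g == sorted(g)
-- ===== Notes on version B (the rewrite author's own statement) =====
-- stated objective: alternative
-- what changed: B replaces A's fused sliding-triplet while-loop with a sort-based monotonicity test: it builds the adjacent-gcd list once via map over the list zipped with its own tail and checks that the list equals its sorted copy, instead of comparing neighbouring gcds index by index.
import Mathlib
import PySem

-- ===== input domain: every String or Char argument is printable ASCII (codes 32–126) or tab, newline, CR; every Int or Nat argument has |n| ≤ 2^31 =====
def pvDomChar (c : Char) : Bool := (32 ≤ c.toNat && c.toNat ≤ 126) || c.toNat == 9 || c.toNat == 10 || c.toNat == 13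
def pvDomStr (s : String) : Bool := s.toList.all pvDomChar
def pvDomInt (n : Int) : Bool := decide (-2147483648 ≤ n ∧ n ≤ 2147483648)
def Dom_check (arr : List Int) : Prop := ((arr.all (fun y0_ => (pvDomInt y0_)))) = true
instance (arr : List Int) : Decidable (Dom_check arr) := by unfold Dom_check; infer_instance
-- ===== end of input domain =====

-- B replaces A's fused sliding-triplet loop by building the adjacent-gcd list once
-- (map gcd over the list zipped with its tail) and comparing it with its sorted copy.

-- ===== PORT A =====
-- A's while-loop with indices l = r-2, m = r-1, r; terminates when r reaches len(arr)
def checkLoop (arr : List Int) (l m r : Nat) : Bool :=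
  if r < arr.length then
    let x := Int.gcd (arr.getD l 0) (arr.getD m 0)
    let y := Int.gcd (arr.getD m 0) (arr.getD r 0)
    if x > y then false
    else checkLoop arr (l + 1) (m + 1) (r + 1)
  else true
termination_by arr.length - r

def check (arr : List Int) : Bool := checkLoop arr 0 1 2

-- ===== PORT B =====
def check_alt (arr : List Int) : Bool :=
  -- g = list(map(math.gcd, arr, arr[1:]))
  let g : List Int := List.zipWith (fun a b => (Int.gcd a b : Int)) arr (arr.drop 1)
  -- return g == sorted(g)
  decide (g = PySem.List.sorted g (fun x => x) false)

-- ===== PRECONDITION & SPEC =====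
def Spec_check (arr : List Int) (out : Bool) : Prop := out = check_alt arr
instance (arr : List Int) (out : Bool) : Decidable (Spec_check arr out) := by unfold Spec_check; infer_instance

-- ===== CLAIM =====
def Claim_equal_check : Prop := ∀ (arr : List Int), Dom_check arr → Spec_check arr (check arr)

-- ===== LEMMAS AND PROOFS =====

-- the per-position predicate A checks
def pvP (arr : List Int) (k : Nat) : Bool :=
  decide (Int.gcd (arr.getD k 0) (arr.getD (k + 1) 0)
        ≤ Int.gcd (arr.getD (k + 1) 0) (arr.getD (k + 2) 0))

theorem checkLoop_eq_range' (arr : List Int) (n k : Nat)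
    (h : arr.length - (k + 2) = n) :
    checkLoop arr k (k + 1) (k + 2) = (List.range' k n).all (pvP arr) := by
  induction n generalizing k with
  | zero =>
    rw [checkLoop]
    have : ¬ (k + 2 < arr.length) := by omega
    simp [this]
  | succ n ih =>
    have hlt : k + 2 < arr.length := by omega
    have hrec := ih (k + 1) (by omega)
    rw [checkLoop]
    have h321 : k + 2 + 1 = k + 1 + 2 := by omega
    simp only [hlt, if_true, List.range'_succ, List.all_cons, h321, hrec, pvP, List.getD]
    split_ifs with hxy
    · simp [show ¬ ((arr[k]?.getD 0).gcd (arr[k + 1]?.getD 0)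
          ≤ (arr[k + 1]?.getD 0).gcd (arr[k + 2]?.getD 0)) from by omega]
    · simp [show (arr[k]?.getD 0).gcd (arr[k + 1]?.getD 0)
          ≤ (arr[k + 1]?.getD 0).gcd (arr[k + 2]?.getD 0) from by omega]

theorem check_eq_all (arr : List Int) :
    check arr = (List.range (arr.length - 2)).all (pvP arr) := by
  have := checkLoop_eq_range' arr (arr.length - 2) 0 rfl
  simpa [check, List.range_eq_range'] using this

-- sorted(g) == g iff g is pairwise non-decreasing
theorem sorted_eq_self_iff_pairwise (g : List Int) :
    g = PySem.List.sorted g (fun x => x) false ↔ g.Pairwise (· ≤ ·) := by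
  constructor
  · intro h
    have hp := PySem.List.sorted_pairwise (xs := g) (key := fun x => x)
    rw [← h] at hp
    exact hp
  · intro h
    exact (PySem.List.sorted_eq_self_of_pairwise (xs := g) (key := fun x => x) h).symm

theorem check_alt_eq_all (arr : List Int) :
    check_alt arr = (List.range (arr.length - 2)).all (pvP arr) := by
  unfold check_alt
  set g : List Int := List.zipWith (fun a b => (Int.gcd a b : Int)) arr (arr.drop 1) with hg
  have hlen : g.length = min arr.length (arr.length - 1) := by
    simp [hg]
  rw [Bool.eq_iff_iff]
  rw [decide_eq_true_iff, sorted_eq_self_iff_pairwise]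
  rw [List.pairwise_iff_getElem]
  simp only [List.all_eq_true, List.mem_range]
  constructor
  · intro h i hi
    have hgl : i + 1 < g.length := by omega
    have := h i (i + 1) (by omega) hgl (by omega)
    have h1 : g[i] = (Int.gcd (arr.getD i 0) (arr.getD (i + 1) 0) : Int) := by
      simp [hg, List.getD, List.getElem?_eq_getElem (by omega : i < arr.length),
        List.getElem?_eq_getElem (by omega : i + 1 < arr.length)]
    have h2 : g[i + 1] = (Int.gcd (arr.getD (i + 1) 0) (arr.getD (i + 2) 0) : Int) := by
      simp [hg, List.getD, List.getElem?_eq_getElem (by omega : i + 1 < arr.length),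
        List.getElem?_eq_getElem (by omega : i + 2 < arr.length), Nat.add_assoc]
    rw [h1, h2] at this
    simpa [pvP] using (by exact_mod_cast this : Int.gcd (arr.getD i 0) (arr.getD (i + 1) 0)
        ≤ Int.gcd (arr.getD (i + 1) 0) (arr.getD (i + 2) 0))
  · intro h
    -- adjacent bound, then transitivity via a chain argument
    have adj : ∀ i (hi : i + 1 < g.length), g[i] ≤ g[i + 1] := by
      intro i hi
      have hi2 : i < arr.length - 2 := by omega
      have := h i hi2
      have h1 : g[i] = (Int.gcd (arr.getD i 0) (arr.getD (i + 1) 0) : Int) := by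
        simp [hg, List.getD, List.getElem?_eq_getElem (by omega : i < arr.length),
          List.getElem?_eq_getElem (by omega : i + 1 < arr.length)]
      have h2 : g[i + 1] = (Int.gcd (arr.getD (i + 1) 0) (arr.getD (i + 2) 0) : Int) := by
        simp [hg, List.getD, List.getElem?_eq_getElem (by omega : i + 1 < arr.length),
          List.getElem?_eq_getElem (by omega : i + 2 < arr.length), Nat.add_assoc]
      rw [h1, h2]
      exact_mod_cast (by simpa [pvP] using this :
        Int.gcd (arr.getD i 0) (arr.getD (i + 1) 0)
          ≤ Int.gcd (arr.getD (i + 1) 0) (arr.getD (i + 2) 0))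
    intro i j hij hj hlt
    have mono : ∀ d i (h : i + d < g.length), g[i] ≤ g[i + d] := by
      intro d
      induction d with
      | zero => intro i h; simp
      | succ d ih =>
        intro i h
        have := ih i (by omega)
        have h2 := adj (i + d) (by omega)
        calc g[i] ≤ g[i + d] := this
          _ ≤ g[i + d + 1] := h2
          _ = g[i + (d + 1)] := by simp [Nat.add_assoc]
    have := mono (j - i) i (by omega)
    simpa [Nat.add_sub_cancel' (le_of_lt hlt)] using this

-- ===== VERDICT =====
theorem check_spec : Claim_equal_check := by
  intro arr _
  unfold Spec_check
  rw [check_eq_all, check_alt_eq_all]
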